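-- pv_equiv track=rewrite | github.com/wesleykirby/seo-cluster-intent-tool | cluster/fuzzy_intent.py | _determine_sub_topic
-- ===== SOURCE A (Python) =====
-- def _determine_sub_topic(keyword: str, main_topic: str) -> str:
--     """Determine sub-topic based on main topic and keyword content"""
--     keyword_lower = keyword.lower()
--
--     if main_topic == 'Sports':
--         if any(term in keyword_lower for term in ['football', 'soccer']):
--             return 'Soccer/Football'
--         elif any(term in keyword_lower for term in ['rugby', 'cricket', 'tennis']):
--             return 'Other Sports'
--         else:
--             return 'General'
--
--     elif main_topic == 'Casino':
--         # Crash Games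
--         if any(term in keyword_lower for term in ['aviator', 'jetx', 'spaceman', 'crash', 'mines', 'plinko', 'limbo']):
--             return 'Crash Games'
--         # Slots
--         elif any(term in keyword_lower for term in ['slots', 'slot', 'book of dead', 'starburst', 'gonzo', 'mega moolah', 'sweet bonanza', 'gates of olympus']):
--             return 'Slots'
--         # Betgames
--         elif any(term in keyword_lower for term in ['betgames', 'wheel of fortune', 'lucky 7', 'lucky 6', 'bet on poker', 'war of bets']):
--             return 'Betgames'
--         # Live Casino
--         elif any(term in keyword_lower for term in ['live', 'dealer', 'roulette', 'blackjack', 'baccarat']):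
--             return 'Live Casino'
--         else:
--             return 'Games'
--
--     elif main_topic == 'Betting':
--         if any(term in keyword_lower for term in ['football', 'soccer']):
--             return 'Soccer/Football'
--         elif any(term in keyword_lower for term in ['rugby', 'cricket', 'tennis']):
--             return 'Other Sports'
--         else:
--             return 'Sport'
--
--     elif main_topic == 'Horse Racing':
--         # SA Racecourses
--         if any(term in keyword_lower for term in ['kenilworth', 'turffontein', 'scottsville', 'flamingo park', 'fairview', 'greyville']):
--             racecourse_map = {
--                 'kenilworth': 'Kenilworth',
--                 'turffontein': 'Turffontein',
--                 'scottsville': 'Scottsville',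
--                 'flamingo park': 'Flamingo Park',
--                 'fairview': 'Fairview',
--                 'greyville': 'Greyville'
--             }
--             for course, name in racecourse_map.items():
--                 if course in keyword_lower:
--                     return name
--         elif any(term in keyword_lower for term in ['vaal', 'clairwood', 'arlington', 'milnerton']):
--             racecourse_map = {
--                 'vaal': 'Vaal',
--                 'clairwood': 'Clairwood',
--                 'arlington': 'Arlington',
--                 'milnerton': 'Milnerton'
--             }
--             for course, name in racecourse_map.items():
--                 if course in keyword_lower:
--                     return name
--         else:
--             return 'General Racing'
--
--     elif main_topic == 'Lottery':
--         # International Lotteries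
--         if any(term in keyword_lower for term in ['sa lottery', 'south african lottery', 'powerball sa', 'daily lotto']):
--             return 'SA Lottery'
--         elif any(term in keyword_lower for term in ['uk lottery', 'uk49', 'uk 49', '49s', 'teatime', 'lunchtime']):
--             return 'UK49'
--         elif any(term in keyword_lower for term in ['euromillions', 'euro millions']):
--             return 'EuroMillions'
--         elif any(term in keyword_lower for term in ['powerball', 'mega millions', 'usa lotto']):
--             # Context-aware PowerBall classification - Default to SA unless explicit US markers
--             if any(us_context in keyword_lower for us_context in ['usa', 'us ', 'power play', 'double play', 'multi-state', 'tennessee', 'florida', 'monday draw', 'wednesday draw', 'saturday draw']):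
--                 return 'USA Lotto'
--             elif 'mega millions' in keyword_lower:
--                 return 'USA Lotto'  # Mega Millions is only US
--             else:
--                 return 'SA Lottery'  # Default PowerBall to SA
--         elif any(term in keyword_lower for term in ['france lotto', 'french lotto']):
--             return 'France Lotto'
--         elif any(term in keyword_lower for term in ['russian lotto', 'stoloto']):
--             return 'Russian Lotto'
--         elif any(term in keyword_lower for term in ['gosloto', 'gosolto']):
--             return 'Gosloto'
--         else:
--             return 'General Lottery'
--
--     else:
--         return 'General'
-- ===== SOURCE B (Python) =====
-- # Table-driven re-implementation: one generic rule scanner over a module-level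
-- # RULES table; only the context-aware PowerBall case keeps an explicit branch.
--
-- _POWERBALL = object()  # sentinel label: resolve via US/SA context check
--
-- RULES = {
--     'Sports': [
--         ('Soccer/Football', ['football', 'soccer']),
--         ('Other Sports', ['rugby', 'cricket', 'tennis']),
--     ],
--     'Casino': [
--         ('Crash Games', ['aviator', 'jetx', 'spaceman', 'crash', 'mines', 'plinko', 'limbo']),
--         ('Slots', ['slots', 'slot', 'book of dead', 'starburst', 'gonzo', 'mega moolah', 'sweet bonanza', 'gates of olympus']),
--         ('Betgames', ['betgames', 'wheel of fortune', 'lucky 7', 'lucky 6', 'bet on poker', 'war of bets']),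
--         ('Live Casino', ['live', 'dealer', 'roulette', 'blackjack', 'baccarat']),
--     ],
--     'Betting': [
--         ('Soccer/Football', ['football', 'soccer']),
--         ('Other Sports', ['rugby', 'cricket', 'tennis']),
--     ],
--     'Horse Racing': [
--         # one rule per course: matching term and returned name coincide
--         ('Kenilworth', ['kenilworth']),
--         ('Turffontein', ['turffontein']),
--         ('Scottsville', ['scottsville']),
--         ('Flamingo Park', ['flamingo park']),
--         ('Fairview', ['fairview']),
--         ('Greyville', ['greyville']),
--         ('Vaal', ['vaal']),
--         ('Clairwood', ['clairwood']),
--         ('Arlington', ['arlington']),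
--         ('Milnerton', ['milnerton']),
--     ],
--     'Lottery': [
--         ('SA Lottery', ['sa lottery', 'south african lottery', 'powerball sa', 'daily lotto']),
--         ('UK49', ['uk lottery', 'uk49', 'uk 49', '49s', 'teatime', 'lunchtime']),
--         ('EuroMillions', ['euromillions', 'euro millions']),
--         (_POWERBALL, ['powerball', 'mega millions', 'usa lotto']),
--         ('France Lotto', ['france lotto', 'french lotto']),
--         ('Russian Lotto', ['russian lotto', 'stoloto']),
--         ('Gosloto', ['gosloto', 'gosolto']),
--     ],
-- }
--
-- DEFAULTS = {
--     'Sports': 'General',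
--     'Casino': 'Games',
--     'Betting': 'Sport',
--     'Horse Racing': 'General Racing',
--     'Lottery': 'General Lottery',
-- }
--
-- _US_MARKERS = ['usa', 'us ', 'power play', 'double play', 'multi-state', 'tennessee',
--                'florida', 'monday draw', 'wednesday draw', 'saturday draw']
--
--
-- def _powerball_label(keyword_lower):
--     """Context-aware PowerBall classification: SA unless explicit US markers."""
--     if any(m in keyword_lower for m in _US_MARKERS):
--         return 'USA Lotto'
--     if 'mega millions' in keyword_lower:
--         return 'USA Lotto'
--     return 'SA Lottery'
--
--
-- def _determine_sub_topic(keyword: str, main_topic: str) -> str: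
--     keyword_lower = keyword.lower()
--     rules = RULES.get(main_topic)
--     if rules is None:
--         return 'General'
--     for label, terms in rules:
--         if any(t in keyword_lower for t in terms):
--             return _powerball_label(keyword_lower) if label is _POWERBALL else label
--     return DEFAULTS[main_topic]
-- ===== Notes on version B (the rewrite author's own statement) =====
-- stated objective: idiomatic
-- what changed: Replaced the hand-written per-topic if/elif chains (including two separate racecourse dicts behind any()-guards) by a single generic first-match scan over a module-level RULES table keyed by topic, with per-topic defaults and a sentinel-labelled rule for the context-aware PowerBall case.
import Mathlib
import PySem

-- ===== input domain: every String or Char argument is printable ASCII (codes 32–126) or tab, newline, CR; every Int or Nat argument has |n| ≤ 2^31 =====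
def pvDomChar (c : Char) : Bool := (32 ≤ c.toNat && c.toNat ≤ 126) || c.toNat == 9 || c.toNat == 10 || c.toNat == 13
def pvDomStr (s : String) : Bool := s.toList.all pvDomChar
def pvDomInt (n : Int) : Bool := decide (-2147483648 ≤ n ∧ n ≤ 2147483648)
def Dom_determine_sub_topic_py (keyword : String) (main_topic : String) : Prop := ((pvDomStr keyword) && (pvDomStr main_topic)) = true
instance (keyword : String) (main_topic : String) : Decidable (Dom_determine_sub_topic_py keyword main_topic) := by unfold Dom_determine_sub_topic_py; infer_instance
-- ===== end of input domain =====

-- B replaces A's hand-written if/elif chains by one generic scan over a module-level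
-- rule table (dict topic -> ordered (label, terms) rules); objective: idiomatic.


-- ===== PORT A =====

-- any(term in keyword_lower for term in terms)
def pvAnyIn (kl : String) (terms : List String) : Bool :=
  terms.any (fun t => PySem.Str.isIn t kl)

-- for course, name in racecourse_map.items(): if course in keyword_lower: return name
def pvFirstCourse (kl : String) : List (String × String) → Option String
  | [] => none
  | (course, name) :: rest =>
      if PySem.Str.isIn course kl then some name else pvFirstCourse kl rest

def determine_sub_topic_py (keyword : String) (main_topic : String) : String :=
  let keyword_lower := PySem.Str.lower keyword
  if main_topic == "Sports" then
    if pvAnyIn keyword_lower ["football", "soccer"] then "Soccer/Football"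
    else if pvAnyIn keyword_lower ["rugby", "cricket", "tennis"] then "Other Sports"
    else "General"
  else if main_topic == "Casino" then
    if pvAnyIn keyword_lower ["aviator", "jetx", "spaceman", "crash", "mines", "plinko", "limbo"] then "Crash Games"
    else if pvAnyIn keyword_lower ["slots", "slot", "book of dead", "starburst", "gonzo", "mega moolah", "sweet bonanza", "gates of olympus"] then "Slots"
    else if pvAnyIn keyword_lower ["betgames", "wheel of fortune", "lucky 7", "lucky 6", "bet on poker", "war of bets"] then "Betgames"
    else if pvAnyIn keyword_lower ["live", "dealer", "roulette", "blackjack", "baccarat"] then "Live Casino"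
    else "Games"
  else if main_topic == "Betting" then
    if pvAnyIn keyword_lower ["football", "soccer"] then "Soccer/Football"
    else if pvAnyIn keyword_lower ["rugby", "cricket", "tennis"] then "Other Sports"
    else "Sport"
  else if main_topic == "Horse Racing" then
    if pvAnyIn keyword_lower ["kenilworth", "turffontein", "scottsville", "flamingo park", "fairview", "greyville"] then
      -- the for-loop over racecourse_map.items(); falling through the loop would fall
      -- off the end of the Python function (unreachable: the guard matched a key)
      (pvFirstCourse keyword_lower
        [("kenilworth", "Kenilworth"), ("turffontein", "Turffontein"),
         ("scottsville", "Scottsville"), ("flamingo park", "Flamingo Park"),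
         ("fairview", "Fairview"), ("greyville", "Greyville")]).getD ""
    else if pvAnyIn keyword_lower ["vaal", "clairwood", "arlington", "milnerton"] then
      (pvFirstCourse keyword_lower
        [("vaal", "Vaal"), ("clairwood", "Clairwood"),
         ("arlington", "Arlington"), ("milnerton", "Milnerton")]).getD ""
    else "General Racing"
  else if main_topic == "Lottery" then
    if pvAnyIn keyword_lower ["sa lottery", "south african lottery", "powerball sa", "daily lotto"] then "SA Lottery"
    else if pvAnyIn keyword_lower ["uk lottery", "uk49", "uk 49", "49s", "teatime", "lunchtime"] then "UK49"
    else if pvAnyIn keyword_lower ["euromillions", "euro millions"] then "EuroMillions"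
    else if pvAnyIn keyword_lower ["powerball", "mega millions", "usa lotto"] then
      if pvAnyIn keyword_lower ["usa", "us ", "power play", "double play", "multi-state", "tennessee", "florida", "monday draw", "wednesday draw", "saturday draw"] then "USA Lotto"
      else if PySem.Str.isIn "mega millions" keyword_lower then "USA Lotto"
      else "SA Lottery"
    else if pvAnyIn keyword_lower ["france lotto", "french lotto"] then "France Lotto"
    else if pvAnyIn keyword_lower ["russian lotto", "stoloto"] then "Russian Lotto"
    else if pvAnyIn keyword_lower ["gosloto", "gosolto"] then "Gosloto"
    else "General Lottery"
  else "General"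

-- ===== PORT B =====

-- RULES: label `none` is the _POWERBALL sentinel (resolved by context)
def pvRules : PySem.Dict String (List (Option String × List String)) :=
  PySem.Dict.ofList
    [("Sports",
      [(some "Soccer/Football", ["football", "soccer"]),
       (some "Other Sports", ["rugby", "cricket", "tennis"])]),
     ("Casino",
      [(some "Crash Games", ["aviator", "jetx", "spaceman", "crash", "mines", "plinko", "limbo"]),
       (some "Slots", ["slots", "slot", "book of dead", "starburst", "gonzo", "mega moolah", "sweet bonanza", "gates of olympus"]),
       (some "Betgames", ["betgames", "wheel of fortune", "lucky 7", "lucky 6", "bet on poker", "war of bets"]),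
       (some "Live Casino", ["live", "dealer", "roulette", "blackjack", "baccarat"])]),
     ("Betting",
      [(some "Soccer/Football", ["football", "soccer"]),
       (some "Other Sports", ["rugby", "cricket", "tennis"])]),
     ("Horse Racing",
      [(some "Kenilworth", ["kenilworth"]), (some "Turffontein", ["turffontein"]),
       (some "Scottsville", ["scottsville"]), (some "Flamingo Park", ["flamingo park"]),
       (some "Fairview", ["fairview"]), (some "Greyville", ["greyville"]),
       (some "Vaal", ["vaal"]), (some "Clairwood", ["clairwood"]),
       (some "Arlington", ["arlington"]), (some "Milnerton", ["milnerton"])]),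
     ("Lottery",
      [(some "SA Lottery", ["sa lottery", "south african lottery", "powerball sa", "daily lotto"]),
       (some "UK49", ["uk lottery", "uk49", "uk 49", "49s", "teatime", "lunchtime"]),
       (some "EuroMillions", ["euromillions", "euro millions"]),
       (none, ["powerball", "mega millions", "usa lotto"]),
       (some "France Lotto", ["france lotto", "french lotto"]),
       (some "Russian Lotto", ["russian lotto", "stoloto"]),
       (some "Gosloto", ["gosloto", "gosolto"])])]

def pvDefaults : PySem.Dict String String :=
  PySem.Dict.ofList
    [("Sports", "General"), ("Casino", "Games"), ("Betting", "Sport"),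
     ("Horse Racing", "General Racing"), ("Lottery", "General Lottery")]

def pvUsMarkers : List String :=
  ["usa", "us ", "power play", "double play", "multi-state", "tennessee",
   "florida", "monday draw", "wednesday draw", "saturday draw"]

def pvPowerballLabel (keyword_lower : String) : String :=
  if pvUsMarkers.any (fun m => PySem.Str.isIn m keyword_lower) then "USA Lotto"
  else if PySem.Str.isIn "mega millions" keyword_lower then "USA Lotto"
  else "SA Lottery"

-- the rule-scanning for-loop of B
def pvScan (kl : String) (dflt : String) : List (Option String × List String) → String
  | [] => dflt
  | (label, terms) :: rest =>
      if terms.any (fun t => PySem.Str.isIn t kl) then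
        match label with
        | some s => s
        | none => pvPowerballLabel kl
      else pvScan kl dflt rest

def determine_sub_topic_py_alt (keyword : String) (main_topic : String) : String :=
  let keyword_lower := PySem.Str.lower keyword
  match PySem.Dict.get? pvRules main_topic with
  | none => "General"
  | some rules =>
      -- DEFAULTS[main_topic]: the key is always present when RULES has it
      pvScan keyword_lower (PySem.Dict.getD pvDefaults main_topic "") rules

-- ===== PRECONDITION & SPEC =====
def Spec_determine_sub_topic_py (keyword : String) (main_topic : String) (out : String) : Prop := out = determine_sub_topic_py_alt keyword main_topic
instance (keyword : String) (main_topic : String) (out : String) : Decidable (Spec_determine_sub_topic_py keyword main_topic out) := by unfold Spec_determine_sub_topic_py; infer_instance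

-- ===== CLAIM (what is proved, stated in full; the proofs are below) =====
def Claim_equal_determine_sub_topic_py : Prop := ∀ (keyword : String) (main_topic : String), Dom_determine_sub_topic_py keyword main_topic → Spec_determine_sub_topic_py keyword main_topic (determine_sub_topic_py keyword main_topic)

-- ===== LEMMAS AND PROOFS =====

-- ===== VERDICT (by name: the statement is the Claim_ definition above) =====
theorem determine_sub_topic_py_spec : Claim_equal_determine_sub_topic_py := by
  intro keyword main_topic _
  unfold Spec_determine_sub_topic_py determine_sub_topic_py determine_sub_topic_py_alt
  by_cases HT1 : main_topic = "Sports"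
  · subst HT1
    rw [show PySem.Dict.get? pvRules "Sports" = some [(some "Soccer/Football", ["football", "soccer"]), (some "Other Sports", ["rugby", "cricket", "tennis"])] from by decide,
        show PySem.Dict.getD pvDefaults "Sports" "" = "General" from by decide]
    simp only [pvScan, pvAnyIn, pvFirstCourse,
               List.any_cons, List.any_nil, Bool.or_false, String.reduceBEq, Bool.false_eq_true, if_false, if_true]

  by_cases HT2 : main_topic = "Casino"
  · subst HT2
    rw [show PySem.Dict.get? pvRules "Casino" = some [(some "Crash Games", ["aviator", "jetx", "spaceman", "crash", "mines", "plinko", "limbo"]),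
       (some "Slots", ["slots", "slot", "book of dead", "starburst", "gonzo", "mega moolah", "sweet bonanza", "gates of olympus"]),
       (some "Betgames", ["betgames", "wheel of fortune", "lucky 7", "lucky 6", "bet on poker", "war of bets"]),
       (some "Live Casino", ["live", "dealer", "roulette", "blackjack", "baccarat"])] from by decide,
        show PySem.Dict.getD pvDefaults "Casino" "" = "Games" from by decide]
    simp only [pvScan, pvAnyIn, pvFirstCourse,
               List.any_cons, List.any_nil, Bool.or_false, String.reduceBEq, Bool.false_eq_true, if_false, if_true]

  by_cases HT3 : main_topic = "Betting"
  · subst HT3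
    rw [show PySem.Dict.get? pvRules "Betting" = some [(some "Soccer/Football", ["football", "soccer"]), (some "Other Sports", ["rugby", "cricket", "tennis"])] from by decide,
        show PySem.Dict.getD pvDefaults "Betting" "" = "Sport" from by decide]
    simp only [pvScan, pvAnyIn, pvFirstCourse,
               List.any_cons, List.any_nil, Bool.or_false, String.reduceBEq, Bool.false_eq_true, if_false, if_true]

  by_cases HT4 : main_topic = "Horse Racing"
  · subst HT4
    rw [show PySem.Dict.get? pvRules "Horse Racing" = some [(some "Kenilworth", ["kenilworth"]), (some "Turffontein", ["turffontein"]),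
       (some "Scottsville", ["scottsville"]), (some "Flamingo Park", ["flamingo park"]),
       (some "Fairview", ["fairview"]), (some "Greyville", ["greyville"]),
       (some "Vaal", ["vaal"]), (some "Clairwood", ["clairwood"]),
       (some "Arlington", ["arlington"]), (some "Milnerton", ["milnerton"])] from by decide,
        show PySem.Dict.getD pvDefaults "Horse Racing" "" = "General Racing" from by decide]
    simp only [pvScan, pvAnyIn, pvFirstCourse,
               List.any_cons, List.any_nil, Bool.or_false, String.reduceBEq, Bool.false_eq_true, if_false, if_true]
    generalize PySem.Str.isIn "kenilworth" (PySem.Str.lower keyword) = c1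
    generalize PySem.Str.isIn "turffontein" (PySem.Str.lower keyword) = c2
    generalize PySem.Str.isIn "scottsville" (PySem.Str.lower keyword) = c3
    generalize PySem.Str.isIn "flamingo park" (PySem.Str.lower keyword) = c4
    generalize PySem.Str.isIn "fairview" (PySem.Str.lower keyword) = c5
    generalize PySem.Str.isIn "greyville" (PySem.Str.lower keyword) = c6
    generalize PySem.Str.isIn "vaal" (PySem.Str.lower keyword) = c7
    generalize PySem.Str.isIn "clairwood" (PySem.Str.lower keyword) = c8
    generalize PySem.Str.isIn "arlington" (PySem.Str.lower keyword) = c9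
    generalize PySem.Str.isIn "milnerton" (PySem.Str.lower keyword) = c10
    revert c1 c2 c3 c4 c5 c6 c7 c8 c9 c10
    decide
  by_cases HT5 : main_topic = "Lottery"
  · subst HT5
    rw [show PySem.Dict.get? pvRules "Lottery" = some [(some "SA Lottery", ["sa lottery", "south african lottery", "powerball sa", "daily lotto"]),
       (some "UK49", ["uk lottery", "uk49", "uk 49", "49s", "teatime", "lunchtime"]),
       (some "EuroMillions", ["euromillions", "euro millions"]),
       (none, ["powerball", "mega millions", "usa lotto"]),
       (some "France Lotto", ["france lotto", "french lotto"]),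
       (some "Russian Lotto", ["russian lotto", "stoloto"]),
       (some "Gosloto", ["gosloto", "gosolto"])] from by decide,
        show PySem.Dict.getD pvDefaults "Lottery" "" = "General Lottery" from by decide]
    simp only [pvScan, pvAnyIn, pvFirstCourse, pvPowerballLabel, pvUsMarkers,
               List.any_cons, List.any_nil, Bool.or_false, String.reduceBEq, Bool.false_eq_true, if_false, if_true]

  · -- unknown topic: every RULES key differs from main_topic
    simp only [PySem.Dict.get?]
    rw [show pvRules.items = [("Sports", [(some "Soccer/Football", ["football", "soccer"]), (some "Other Sports", ["rugby", "cricket", "tennis"])]), ("Casino", [(some "Crash Games", ["aviator", "jetx", "spaceman", "crash", "mines", "plinko", "limbo"]),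
       (some "Slots", ["slots", "slot", "book of dead", "starburst", "gonzo", "mega moolah", "sweet bonanza", "gates of olympus"]),
       (some "Betgames", ["betgames", "wheel of fortune", "lucky 7", "lucky 6", "bet on poker", "war of bets"]),
       (some "Live Casino", ["live", "dealer", "roulette", "blackjack", "baccarat"])]), ("Betting", [(some "Soccer/Football", ["football", "soccer"]), (some "Other Sports", ["rugby", "cricket", "tennis"])]), ("Horse Racing", [(some "Kenilworth", ["kenilworth"]), (some "Turffontein", ["turffontein"]),
       (some "Scottsville", ["scottsville"]), (some "Flamingo Park", ["flamingo park"]),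
       (some "Fairview", ["fairview"]), (some "Greyville", ["greyville"]),
       (some "Vaal", ["vaal"]), (some "Clairwood", ["clairwood"]),
       (some "Arlington", ["arlington"]), (some "Milnerton", ["milnerton"])]), ("Lottery", [(some "SA Lottery", ["sa lottery", "south african lottery", "powerball sa", "daily lotto"]),
       (some "UK49", ["uk lottery", "uk49", "uk 49", "49s", "teatime", "lunchtime"]),
       (some "EuroMillions", ["euromillions", "euro millions"]),
       (none, ["powerball", "mega millions", "usa lotto"]),
       (some "France Lotto", ["france lotto", "french lotto"]),
       (some "Russian Lotto", ["russian lotto", "stoloto"]),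
       (some "Gosloto", ["gosloto", "gosolto"])])] from by decide]
    have e1 : ("Sports" == main_topic) = false := beq_eq_false_iff_ne.mpr (Ne.symm HT1)
    have e2 : ("Casino" == main_topic) = false := beq_eq_false_iff_ne.mpr (Ne.symm HT2)
    have e3 : ("Betting" == main_topic) = false := beq_eq_false_iff_ne.mpr (Ne.symm HT3)
    have e4 : ("Horse Racing" == main_topic) = false := beq_eq_false_iff_ne.mpr (Ne.symm HT4)
    have e5 : ("Lottery" == main_topic) = false := beq_eq_false_iff_ne.mpr (Ne.symm HT5)
    simp [e1, e2, e3, e4, e5, HT1, HT2, HT3, HT4, HT5]
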